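-- pv_equiv track=rewrite | github.com/Graviti-AI/tensorbay-python-sdk | tensorbay/opendataset/_utility/nuScenes.py | transpose_rle
-- ===== SOURCE A (Python) =====
-- from bisect import bisect
-- from itertools import accumulate
-- from typing import Any, Dict, List, Union
--
-- def transpose_rle(rle: List[int], height: int, width: int) -> List[int]:
--     """Transpose function for uncompressed RLE.
--
--     Arguments:
--         rle: The original RLE.
--         height: The height of mask.
--         width: The width of mask.
--
--     Returns:
--         RLE which has been transposed.
--
--     """
--     accumulate_values = list(accumulate(rle))
--     flag = 0
--     count = 0
--     rle = []
--     for i in range(height):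
--         for index in range(i, i + height * width, height):
--             if bisect(accumulate_values, index) % 2 == flag:
--                 count += 1
--                 continue
--             flag = 1 - flag
--             rle.append(count)
--             count = 1
--     rle.append(count)
--     return rle
-- ===== SOURCE B (Python) =====
-- from itertools import accumulate
-- from typing import List
--
--
-- def transpose_rle(rle: List[int], height: int, width: int) -> List[int]:
--     """Decode the RLE once into a flat 0/1 mask (clamped prefix-sum
--     thresholds), then run-length encode the mask in transposed order."""
--     if height <= 0 or width <= 0:
--         return [0]
--     total = height * width
--     acc = list(accumulate(rle))
--     mask = []
--     for j, a in enumerate(acc):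
--         t = min(max(a, 0), total)
--         mask += [j % 2] * (t - len(mask))
--     mask += [len(acc) % 2] * (total - len(mask))
--     runs = [0]
--     cur = 0
--     for i in range(height):
--         for k in range(width):
--             v = mask[k * height + i]
--             if v == cur:
--                 runs[-1] += 1
--             else:
--                 cur = v
--                 runs.append(1)
--     return runs
-- ===== Notes on version B (the rewrite author's own statement) =====
-- stated objective: alternative
-- what changed: B decodes the RLE once into a flat 0/1 mask via its clamped prefix-sum thresholds and then run-length encodes the mask in transposed order, instead of running a bisect binary search over the prefix sums for every one of the H*W pixels; intended as faster (measured 1.6-2.2x on sizes where both finish) but unconfirmed at the largest timing size, so no speed is claimed.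
-- outside the precondition, e.g. on transpose_rle([6, -5, -5], 2, 2): A returns [1, 3], B returns [4]
import Mathlib
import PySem

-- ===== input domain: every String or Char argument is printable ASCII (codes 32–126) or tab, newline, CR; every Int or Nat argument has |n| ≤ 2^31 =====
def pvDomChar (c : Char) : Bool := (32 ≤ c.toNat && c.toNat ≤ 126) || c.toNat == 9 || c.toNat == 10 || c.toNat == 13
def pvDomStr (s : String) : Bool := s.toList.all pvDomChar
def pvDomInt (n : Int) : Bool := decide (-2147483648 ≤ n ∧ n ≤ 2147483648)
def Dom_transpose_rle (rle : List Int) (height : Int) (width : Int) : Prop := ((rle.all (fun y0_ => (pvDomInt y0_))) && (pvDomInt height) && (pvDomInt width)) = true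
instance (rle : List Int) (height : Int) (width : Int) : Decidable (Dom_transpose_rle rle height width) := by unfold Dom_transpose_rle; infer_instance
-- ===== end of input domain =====

-- B decodes the RLE once into a flat 0/1 mask (clamped prefix-sum thresholds) and then
-- run-length encodes the mask in transposed order, replacing A's per-pixel bisect.

-- ===== PORT A =====
-- itertools.accumulate(rle)
def pyAccumulate (s : Int) : List Int → List Int
  | [] => []
  | x :: xs => (s + x) :: pyAccumulate (s + x) xs

-- body of A's inner loop: bisect(accumulate_values, index) % 2 == flag / flip-and-append
def aStep (acc : List Int) (st : Int × Int × List Int) (index : Int) : Int × Int × List Int :=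
  if (((PySem.List.bisectRight acc index) % 2 : Nat) : Int) == st.1 then
    (st.1, st.2.1 + 1, st.2.2)
  else
    (1 - st.1, 1, st.2.2 ++ [st.2.1])

-- A's inner loop: for index in range(i, i + height * width, height)
def aOuter (acc : List Int) (height width : Int) (st : Int × Int × List Int) (i : Int) : Int × Int × List Int :=
  (PySem.List.pyRange i (i + height * width) height).foldl (aStep acc) st

def transpose_rle (rle : List Int) (height : Int) (width : Int) : List Int :=
  let accumulate_values := pyAccumulate 0 rle
  let st := (PySem.List.pyRange 0 height 1).foldl (aOuter accumulate_values height width) (0, 0, [])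
  st.2.2 ++ [st.2.1]

-- ===== PORT B =====
-- runs[-1] += 1
def incLast : List Int → List Int
  | [] => []
  | [x] => [x + 1]
  | x :: xs => x :: incLast xs

-- body of B's decode loop: t = min(max(a, 0), total); mask += [j % 2] * (t - len(mask))
def decStep (total : Int) (st : List Int × Nat) (a : Int) : List Int × Nat :=
  (st.1 ++ List.replicate ((min (max a 0) total) - (st.1.length : Int)).toNat ((st.2 % 2 : Nat) : Int),
   st.2 + 1)

-- B's decoded flat mask: the decode loop plus the final padding with len(acc) % 2
def maskOf (rle : List Int) (total : Int) : List Int :=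
  let acc := pyAccumulate 0 rle
  let dec := acc.foldl (decStep total) ([], 0)
  dec.1 ++ List.replicate (total - (dec.1.length : Int)).toNat ((acc.length % 2 : Nat) : Int)

-- body of B's encode loop on the current mask value v
def encStep (st : List Int × Int) (v : Int) : List Int × Int :=
  if v == st.2 then (incLast st.1, st.2) else (st.1 ++ [1], v)

-- B's inner loop: for k in range(width): v = mask[k * height + i]
def bOuter (mask : List Int) (height width : Int) (st : List Int × Int) (i : Int) : List Int × Int :=
  (PySem.List.pyRange 0 width 1).foldl
    (fun st k => encStep st (PySem.List.pyGetD mask (k * height + i) 0)) st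

def transpose_rle_alt (rle : List Int) (height : Int) (width : Int) : List Int :=
  if height ≤ 0 ∨ width ≤ 0 then [0]
  else
    let mask := maskOf rle (height * width)
    ((PySem.List.pyRange 0 height 1).foldl (bOuter mask height width) ([0], 0)).1

-- ===== PRECONDITION & SPEC =====
-- Pre_ excludes only inputs with a positive mask area (height > 0 and width > 0) whose RLE has a
-- negative run length after the first entry: such a list is not a valid uncompressed RLE, and A's
-- bisect then searches a non-monotone prefix-sum list, returning values with no decode meaning.
def Pre_transpose_rle (rle : List Int) (height : Int) (width : Int) : Prop :=
  height ≤ 0 ∨ width ≤ 0 ∨ ∀ r ∈ rle.tail, 0 ≤ r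
instance (rle : List Int) (height : Int) (width : Int) : Decidable (Pre_transpose_rle rle height width) := by
  unfold Pre_transpose_rle; infer_instance

def pvWitness_transpose_rle : List Int × Int × Int := ([2, 3, 1], 2, 3)

def Spec_transpose_rle (rle : List Int) (height : Int) (width : Int) (out : List Int) : Prop :=
  out = transpose_rle_alt rle height width
instance (rle : List Int) (height : Int) (width : Int) (out : List Int) : Decidable (Spec_transpose_rle rle height width out) := by
  unfold Spec_transpose_rle; infer_instance

-- ===== CLAIM (what is proved, stated in full; the proofs are below) =====
def Claim_equal_transpose_rle : Prop := ∀ (rle : List Int) (height : Int) (width : Int), Dom_transpose_rle rle height width → Pre_transpose_rle rle height width → Spec_transpose_rle rle height width (transpose_rle rle height width)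

-- ===== LEMMAS AND PROOFS =====

-- the 0/1 value carried by a run count
def pbit (c : Nat) : Int := ((c % 2 : Nat) : Int)

-- number of prefix-sum thresholds ≤ x
def cnt (acc : List Int) (x : Int) : Nat := acc.countP (fun a => decide (a ≤ x))

lemma pyAccumulate_lb (xs : List Int) (t : Int) (h : ∀ r ∈ xs, 0 ≤ r) :
    ∀ a ∈ pyAccumulate t xs, t ≤ a := by
  induction xs generalizing t with
  | nil => simp [pyAccumulate]
  | cons x xs ih =>
    intro a ha
    have hx : 0 ≤ x := h x (by simp)
    simp only [pyAccumulate, List.mem_cons] at ha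
    rcases ha with rfl | ha
    · omega
    · have := ih (t + x) (fun r hr => h r (by simp [hr])) a ha
      omega

lemma pyAccumulate_sorted_all (xs : List Int) (h : ∀ r ∈ xs, 0 ≤ r) :
    ∀ t, (pyAccumulate t xs).Pairwise (· ≤ ·) := by
  induction xs with
  | nil => intro t; simp [pyAccumulate]
  | cons x xs ih =>
    intro t
    simp only [pyAccumulate]
    constructor
    · exact pyAccumulate_lb xs (t + x) (fun r hr => h r (by simp [hr]))
    · exact ih (fun r hr => h r (by simp [hr])) (t + x)

lemma pyAccumulate_sorted (xs : List Int) (t : Int) (h : ∀ r ∈ xs.tail, 0 ≤ r) :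
    (pyAccumulate t xs).Pairwise (· ≤ ·) := by
  cases xs with
  | nil => simp [pyAccumulate]
  | cons x xs =>
    simp only [List.tail_cons] at h
    simp only [pyAccumulate]
    constructor
    · exact pyAccumulate_lb xs (t + x) h
    · exact pyAccumulate_sorted_all xs h (t + x)

lemma bisect_eq_cnt (acc : List Int) (x : Int) (hs : acc.Pairwise (· ≤ ·)) :
    PySem.List.bisectRight acc x = cnt acc x := by
  obtain ⟨hle, hlt, hgt⟩ := PySem.List.bisectRight_spec acc x hs
  set r := PySem.List.bisectRight acc x with hr
  have h1 : (acc.take r).countP (fun a => decide (a ≤ x)) = (acc.take r).length := by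
    apply List.countP_eq_length.mpr
    intro a ha
    obtain ⟨j, hj, hja⟩ := List.mem_take_iff_getElem.mp ha
    have := hlt j (by omega) (by omega)
    simp only [← hja, decide_eq_true_eq]
    omega
  have h2 : (acc.drop r).countP (fun a => decide (a ≤ x)) = 0 := by
    apply List.countP_eq_zero.mpr
    intro a ha
    obtain ⟨j, hj, hja⟩ := List.mem_iff_getElem.mp ha
    rw [List.getElem_drop] at hja
    have hjl : r + j < acc.length := by
      have := List.length_drop (i := r) (l := acc); omega
    have := hgt (r + j) hjl (by omega)
    simp only [← hja, decide_eq_true_eq]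
    omega
  have h3 : (acc.take r).length = r := by
    simp [List.length_take]; omega
  have hsplit : acc.countP (fun a => decide (a ≤ x))
      = (acc.take r).countP (fun a => decide (a ≤ x)) + (acc.drop r).countP (fun a => decide (a ≤ x)) := by
    rw [← List.countP_append, List.take_append_drop]
  unfold cnt
  omega

-- decode loop invariant: running B's decode from a mask that is the bit table on [0, m)
-- extends it to the bit table on [0, T)
lemma decode_inv (T : Int) (hT : 0 ≤ T) :
    ∀ (as : List Int) (j : Nat) (mask : List Int),
      as.Pairwise (· ≤ ·) →
      (mask.length : Int) ≤ T →
      (∀ a ∈ as, (mask.length : Int) ≤ min (max a 0) T) →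
      (as.foldl (decStep T) (mask, j)).1
        ++ List.replicate (T - (((as.foldl (decStep T) (mask, j)).1.length : Int))).toNat (pbit (j + as.length))
      = mask ++ (List.range' mask.length (T.toNat - mask.length)).map (fun k : Nat => pbit (j + cnt as (k : Int))) := by
  intro as
  induction as with
  | nil =>
    intro j mask _ hmT _
    simp only [List.foldl_nil, List.length_nil, Nat.add_zero, cnt, List.countP_nil]
    have hrep : (List.range' mask.length (T.toNat - mask.length)).map (fun _ : Nat => pbit j)
        = List.replicate (T - (mask.length : Int)).toNat (pbit j) := by
      rw [List.map_const', List.length_range']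
      congr 1
      omega
    rw [← hrep]
  | cons a as ih =>
    intro j mask hp hmT hcl
    obtain ⟨ha_all, hp'⟩ := List.pairwise_cons.mp hp
    have hclA : (mask.length : Int) ≤ min (max a 0) T := hcl a (List.mem_cons_self)
    have ht0 : 0 ≤ min (max a 0) T := by omega
    have htT : min (max a 0) T ≤ T := by omega
    simp only [List.foldl_cons]
    have hstep : decStep T (mask, j) a
        = (mask ++ List.replicate ((min (max a 0) T) - (mask.length : Int)).toNat (pbit j), j + 1) := rfl
    rw [hstep]
    set t := min (max a 0) T with ht
    set mask' := mask ++ List.replicate (t - (mask.length : Int)).toNat (pbit j) with hm'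
    have hlen' : (mask'.length : Int) = t := by
      simp only [hm', List.length_append, List.length_replicate]
      push_cast
      omega
    have hIH := ih (j + 1) mask' hp'
      (by rw [hlen']; exact htT)
      (by intro x hx
          rw [hlen']
          have hax := ha_all x hx
          omega)
    have hj : j + (a :: as).length = (j + 1) + as.length := by simp; omega
    rw [hj, hIH]
    have hlenN : mask'.length = t.toNat := by omega
    have hsplit : List.range' mask.length (T.toNat - mask.length)
        = List.range' mask.length (t.toNat - mask.length) ++ List.range' t.toNat (T.toNat - t.toNat) := by
      have h := List.range'_append (s := mask.length) (m := t.toNat - mask.length) (n := T.toNat - t.toNat) (step := 1)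
      have e1 : mask.length + 1 * (t.toNat - mask.length) = t.toNat := by omega
      have e2 : (t.toNat - mask.length) + (T.toNat - t.toNat) = T.toNat - mask.length := by omega
      rw [e1, e2] at h
      exact h.symm
    rw [hsplit, List.map_append]
    have hfst : (List.range' mask.length (t.toNat - mask.length)).map (fun k : Nat => pbit (j + cnt (a :: as) (k : Int)))
        = List.replicate (t - (mask.length : Int)).toNat (pbit j) := by
      have hptw : ∀ k ∈ List.range' mask.length (t.toNat - mask.length),
          pbit (j + cnt (a :: as) (k : Int)) = pbit j := by
        intro k hk
        rw [List.mem_range'_1] at hk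
        have hkt : (k : Int) < t := by omega
        have hka : (k : Int) < a := by omega
        have hc : cnt (a :: as) (k : Int) = 0 := by
          unfold cnt
          rw [List.countP_cons]
          have h0 : (List.countP (fun x => decide (x ≤ (k : Int))) as) = 0 := by
            apply List.countP_eq_zero.mpr
            intro x hx
            have := ha_all x hx
            simp only [decide_eq_true_eq]
            omega
          simp only [h0, decide_eq_true_eq]
          have : ¬ (a ≤ (k : Int)) := by omega
          simp [this]
        rw [hc]
        simp
      rw [List.map_congr_left hptw, List.map_const', List.length_range']
      congr 1
      omega
    have hsnd : (List.range' t.toNat (T.toNat - t.toNat)).map (fun k : Nat => pbit (j + cnt (a :: as) (k : Int)))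
        = (List.range' t.toNat (T.toNat - t.toNat)).map (fun k : Nat => pbit ((j + 1) + cnt as (k : Int))) := by
      apply List.map_congr_left
      intro k hk
      rw [List.mem_range'_1] at hk
      have hkT : (k : Int) < T := by omega
      have hka : a ≤ (k : Int) := by omega
      have hc : cnt (a :: as) (k : Int) = cnt as (k : Int) + 1 := by
        unfold cnt
        rw [List.countP_cons]
        simp [hka]
      rw [hc]
      congr 1
      omega
    rw [hfst, hsnd, hlenN, ← List.append_assoc]

-- the decoded padded mask is exactly the table of per-pixel parities
lemma mask_eq (rle : List Int) (T : Int) (hT : 0 ≤ T)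
    (hs : (pyAccumulate 0 rle).Pairwise (· ≤ ·)) :
    maskOf rle T = (List.range T.toNat).map (fun k : Nat => pbit (cnt (pyAccumulate 0 rle) (k : Int))) := by
  have h := decode_inv T hT (pyAccumulate 0 rle) 0 [] hs (by simpa using hT)
    (by intro a _
        have h0 : ((List.length ([] : List Int)) : Int) = 0 := by simp
        omega)
  simp only [List.length_nil, List.nil_append, Nat.sub_zero, Nat.zero_add] at h
  unfold maskOf
  rw [List.range_eq_range']
  exact h

-- A's loop body is B's encode body applied to the bisect parity
def bitA (acc : List Int) (x : Int) : Int := (((PySem.List.bisectRight acc x) % 2 : Nat) : Int)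

def valStepA (st : Int × Int × List Int) (v : Int) : Int × Int × List Int :=
  if v == st.1 then (st.1, st.2.1 + 1, st.2.2) else (1 - st.1, 1, st.2.2 ++ [st.2.1])

lemma aStep_eq_valStepA (acc : List Int) (st : Int × Int × List Int) (x : Int) :
    aStep acc st x = valStepA st (bitA acc x) := rfl

lemma incLast_append (xs : List Int) (c : Int) : incLast (xs ++ [c]) = xs ++ [c + 1] := by
  induction xs with
  | nil => rfl
  | cons x xs ih =>
    cases xs with
    | nil => simp [incLast]
    | cons y ys => simpa [incLast] using ih

-- one step of the two encode loops from related states stays related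
lemma step_rel (x : Int × Int × List Int) (y : List Int × Int) (v : Int)
    (hv : v = 0 ∨ v = 1) (hy : y = (x.2.2 ++ [x.2.1], x.1)) (hx01 : x.1 = 0 ∨ x.1 = 1) :
    encStep y v = ((valStepA x v).2.2 ++ [(valStepA x v).2.1], (valStepA x v).1)
    ∧ ((valStepA x v).1 = 0 ∨ (valStepA x v).1 = 1) := by
  obtain ⟨f0, c0, o0⟩ := x
  simp only at hy
  subst hy
  by_cases hvf : v = f0
  · constructor
    · simp [encStep, valStepA, hvf, incLast_append]
    · simpa [valStepA, hvf] using hx01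
  · simp only at hx01
    have hv1 : v = 1 - f0 := by rcases hv with rfl | rfl <;> rcases hx01 with rfl | rfl <;> omega
    subst hv1
    rcases hx01 with rfl | rfl <;>
      exact ⟨by simp [encStep, valStepA], by simp [valStepA]⟩

-- two folds over the same list preserve a relation preserved by their steps
lemma foldl_rel {α β γ : Type} (R : α → β → Prop) (f : α → γ → α) (g : β → γ → β) :
    ∀ (l : List γ) (a : α) (b : β), R a b →
      (∀ c ∈ l, ∀ x y, R x y → R (f x c) (g y c)) →
      R (l.foldl f a) (l.foldl g b) := by
  intro l
  induction l with
  | nil => intro a b hab _; exact hab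
  | cons c cs ih =>
    intro a b hab hstep
    exact ih _ _ (hstep c (by simp) a b hab) (fun c' hc' => hstep c' (by simp [hc']))

-- a fold whose steps fix every state is the identity
lemma foldl_id {α γ : Type} (f : α → γ → α) (l : List γ) (h : ∀ c ∈ l, ∀ x, f x c = x) :
    ∀ a, l.foldl f a = a := by
  induction l with
  | nil => intro a; rfl
  | cons c cs ih =>
    intro a
    rw [List.foldl_cons, h c (by simp), ih (fun c' hc' => h c' (by simp [hc']))]

-- one row of the transposed traversal: A's bisect loop and B's mask loop stay in lockstep
lemma outer_step (rle : List Int) (h w : Int)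
    (hpre : h ≤ 0 ∨ w ≤ 0 ∨ ∀ r ∈ rle.tail, 0 ≤ r)
    (i : Int) (hi : i ∈ PySem.List.pyRange 0 h 1)
    (x : Int × Int × List Int) (y : List Int × Int)
    (hR : y = (x.2.2 ++ [x.2.1], x.1) ∧ (x.1 = 0 ∨ x.1 = 1)) :
    bOuter (maskOf rle (h * w)) h w y i
      = ((aOuter (pyAccumulate 0 rle) h w x i).2.2 ++ [(aOuter (pyAccumulate 0 rle) h w x i).2.1],
         (aOuter (pyAccumulate 0 rle) h w x i).1)
    ∧ ((aOuter (pyAccumulate 0 rle) h w x i).1 = 0 ∨ (aOuter (pyAccumulate 0 rle) h w x i).1 = 1) := by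
  obtain ⟨hy, hx01⟩ := hR
  have hi' := PySem.List.mem_pyRange_one.mp hi
  have hh : 0 < h := by omega
  -- the inner index count is width (clamped at 0)
  have hN : (if i < i + h * w then ((i + h * w - i + h - 1) / h).toNat else 0) = w.toNat := by
    by_cases hw : 0 < w
    · have hpos : 0 < h * w := mul_pos hh hw
      rw [if_pos (by omega)]
      have e : i + h * w - i + h - 1 = (h - 1) + w * h := by ring
      rw [e, Int.add_mul_ediv_right _ _ (by omega : h ≠ 0),
        Int.ediv_eq_zero_of_lt (by omega) (by omega)]
      simp
    · have hw' : w ≤ 0 := by omega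
      have hnp : h * w ≤ 0 := mul_nonpos_iff.mpr (Or.inl ⟨le_of_lt hh, hw'⟩)
      rw [if_neg (by omega)]
      omega
  unfold aOuter bOuter
  rw [PySem.List.pyRange_of_pos _ _ hh, hN, List.foldl_map, PySem.List.pyRange_one, List.foldl_map]
  simp only [zero_add, sub_zero]
  by_cases hw : 0 < w
  · -- the width is positive: the RLE is a valid one, its prefix sums are sorted
    have hsorted : (pyAccumulate 0 rle).Pairwise (· ≤ ·) := by
      apply pyAccumulate_sorted
      rcases hpre with hp | hp | hp
      · omega
      · omega
      · exact hp
    refine foldl_rel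
      (fun (x : Int × Int × List Int) (y : List Int × Int) =>
        y = (x.2.2 ++ [x.2.1], x.1) ∧ (x.1 = 0 ∨ x.1 = 1))
      _ _ (List.range w.toNat) x y ⟨hy, hx01⟩ ?_
    intro k hk a b hRab
    rw [List.mem_range] at hk
    have hkw : (k : Int) < w := by omega
    have hidx0 : 0 ≤ (k : Int) * h + i := by
      have hkh : (0 : Int) ≤ (k : Int) * h := mul_nonneg (by omega) (by omega)
      omega
    have hidxT : (k : Int) * h + i < h * w := by
      have h1 : (k : Int) * h ≤ (w - 1) * h :=
        mul_le_mul_of_nonneg_right (by omega) (le_of_lt hh)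
      have h2 : (w - 1) * h + h = w * h := by ring
      have h3 : w * h = h * w := by ring
      omega
    have hv_eq : PySem.List.pyGetD (maskOf rle (h * w)) ((k : Int) * h + i) 0
        = bitA (pyAccumulate 0 rle) (i + h * (k : Int)) := by
      rw [mask_eq rle (h * w) (le_of_lt (mul_pos hh hw)) hsorted,
        PySem.List.pyGetD_of_nonneg _ _ hidx0,
        PySem.List.getD_map_range _ _ _ _ (by omega : ((k : Int) * h + i).toNat < (h * w).toNat)]
      unfold bitA
      rw [bisect_eq_cnt _ _ hsorted, Int.toNat_of_nonneg hidx0]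
      have : (k : Int) * h + i = i + h * (k : Int) := by ring
      rw [this]
      rfl
    rw [aStep_eq_valStepA, hv_eq]
    exact step_rel a b _ (by unfold bitA; omega) hRab.1 hRab.2
  · -- empty width: both inner loops are over the empty range
    have hw0 : w.toNat = 0 := by omega
    rw [hw0]
    simp only [List.range_zero, List.foldl_nil]
    exact ⟨hy, hx01⟩

-- ===== VERDICT (by name: the statement is the Claim_ definition above) =====
theorem transpose_rle_spec : Claim_equal_transpose_rle := by
  intro rle h w _ hpre
  unfold Spec_transpose_rle
  by_cases hd : h ≤ 0 ∨ w ≤ 0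
  · -- empty pixel area: A's loops never run and B returns [0] up front
    rw [transpose_rle_alt, if_pos hd]
    simp only [transpose_rle]
    rcases hd with hd | hd
    · rw [PySem.List.pyRange_one_eq_nil (by omega)]
      rfl
    · by_cases hh0 : h ≤ 0
      · rw [PySem.List.pyRange_one_eq_nil (by omega)]
        rfl
      · have hh : 0 < h := by omega
        rw [foldl_id _ _ (by
          intro i hi st
          unfold aOuter
          rw [PySem.List.pyRange_of_pos _ _ hh]
          have hnp : h * w ≤ 0 := mul_nonpos_iff.mpr (Or.inl ⟨le_of_lt hh, hd⟩)
          rw [if_neg (by omega)]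
          rfl)]
        rfl
  · push Not at hd
    rw [transpose_rle_alt, if_neg (by omega)]
    simp only [transpose_rle]
    have main := foldl_rel
      (fun (x : Int × Int × List Int) (y : List Int × Int) =>
        y = (x.2.2 ++ [x.2.1], x.1) ∧ (x.1 = 0 ∨ x.1 = 1))
      (aOuter (pyAccumulate 0 rle) h w) (bOuter (maskOf rle (h * w)) h w)
      (PySem.List.pyRange 0 h 1) (0, 0, []) ([0], 0)
      ⟨by simp, Or.inl rfl⟩
      (fun i hi x y hR => outer_step rle h w hpre i hi x y hR)
    rw [main.1]
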